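-- pv_equiv track=rewrite | github.com/dholab/allele-discovery | bin/filter_alignments.py | is_soft_clipping_only_at_ends
-- ===== SOURCE A (Python) =====
-- def is_soft_clipping_only_at_ends(cigar_tuples: list[tuple[int, int]]) -> bool:
--     """
--     Check if soft clipping occurs only at the ends of the CIGAR string.
--
--     Args:
--         cigar_tuples (list of tuples): CIGAR operations as (operation, length).
--
--     Returns:
--         bool: True if soft clipping is only at the ends, False otherwise.
--     """
--     if not cigar_tuples:
--         return False
--
--     # Count how many soft clipping operations we find
--     soft_clip_op = 4
--     soft_clip_positions = [idx for idx, (op, _) in enumerate(cigar_tuples) if op == soft_clip_op]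
--
--     # If no soft clipping at all, return True
--     if not soft_clip_positions:
--         return True
--
--     # Check if all soft clipping positions are at the ends
--     return all(pos == 0 or pos == len(cigar_tuples) - 1 for pos in soft_clip_positions)
-- ===== SOURCE B (Python) =====
-- def is_soft_clipping_only_at_ends(cigar_tuples: list[tuple[int, int]]) -> bool:
--     if not cigar_tuples:
--         return False
--     return not any(op == 4 for op, _ in cigar_tuples[1:-1])
-- ===== Notes on version B (the rewrite author's own statement) =====
-- stated objective: simpler
-- what changed: Instead of building the list of soft-clip positions and checking each against 0 and len-1, B slices away the two endpoints and returns True iff no soft-clip op occurs in the interior.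
import Mathlib
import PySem

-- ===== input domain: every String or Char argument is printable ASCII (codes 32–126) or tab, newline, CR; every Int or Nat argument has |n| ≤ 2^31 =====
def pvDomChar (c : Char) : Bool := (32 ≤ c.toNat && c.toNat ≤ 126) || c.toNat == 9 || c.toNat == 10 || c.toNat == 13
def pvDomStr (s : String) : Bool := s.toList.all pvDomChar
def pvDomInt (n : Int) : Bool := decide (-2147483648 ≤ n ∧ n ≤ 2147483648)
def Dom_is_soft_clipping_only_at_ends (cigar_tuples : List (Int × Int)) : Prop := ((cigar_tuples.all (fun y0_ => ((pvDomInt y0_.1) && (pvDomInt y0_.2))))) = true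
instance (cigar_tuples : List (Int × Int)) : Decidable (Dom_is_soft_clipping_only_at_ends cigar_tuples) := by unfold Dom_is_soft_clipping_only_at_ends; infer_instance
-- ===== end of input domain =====

-- B drops A's list of soft-clip positions and instead checks that no soft-clip op (4)
-- occurs in the interior slice cigar_tuples[1:-1] (objective: simpler; same O(n) cost).


-- ===== PORT A =====
-- A: collect the indices of soft-clip ops, then check every such index is 0 or len-1.
def is_soft_clipping_only_at_ends (cigar_tuples : List (Int × Int)) : Bool :=
  if cigar_tuples = [] then false
  else
    let soft_clip_positions :=
      ((PySem.List.enumerate cigar_tuples 0).filter (fun p => p.2.1 == 4)).map (fun p => p.1)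
    if soft_clip_positions = [] then true
    else soft_clip_positions.all
      (fun pos => pos == 0 || pos == (cigar_tuples.length : Int) - 1)

-- ===== PORT B =====
-- B: no position list; just check no soft-clip op appears in the interior slice [1:-1].
def is_soft_clipping_only_at_ends_alt (cigar_tuples : List (Int × Int)) : Bool :=
  if cigar_tuples = [] then false
  else !((PySem.List.slice cigar_tuples (some 1) (some (-1))).any (fun p => p.1 == 4))

-- ===== PRECONDITION & SPEC =====
def Spec_is_soft_clipping_only_at_ends (cigar_tuples : List (Int × Int)) (out : Bool) : Prop := out = is_soft_clipping_only_at_ends_alt cigar_tuples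
instance (cigar_tuples : List (Int × Int)) (out : Bool) : Decidable (Spec_is_soft_clipping_only_at_ends cigar_tuples out) := by unfold Spec_is_soft_clipping_only_at_ends; infer_instance

-- ===== CLAIM (what is proved, stated in full; the proofs are below) =====
def Claim_equal_is_soft_clipping_only_at_ends : Prop := ∀ (cigar_tuples : List (Int × Int)), Dom_is_soft_clipping_only_at_ends cigar_tuples → Spec_is_soft_clipping_only_at_ends cigar_tuples (is_soft_clipping_only_at_ends cigar_tuples)

-- ===== LEMMAS AND PROOFS =====

-- ===== VERDICT (by name: the statement is the Claim_ definition above) =====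
lemma slice_interior (xs : List (Int × Int)) :
    PySem.List.slice xs (some 1) (some (-1)) = (xs.drop 1).take (xs.length - 2) := by
  cases xs with
  | nil => simp [PySem.List.slice, PySem.List.clampIdx]
  | cons a rest =>
    simp [PySem.List.slice, PySem.List.clampIdx]
    split_ifs <;> omega

lemma main_lemma (xs : List (Int × Int)) :
    is_soft_clipping_only_at_ends xs = is_soft_clipping_only_at_ends_alt xs := by
  by_cases hxs : xs = []
  · subst hxs; rfl
  · unfold is_soft_clipping_only_at_ends is_soft_clipping_only_at_ends_alt
    rw [if_neg hxs, if_neg hxs, slice_interior]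
    rw [show ∀ (l : List Int) (pred : Int → Bool),
          (if l = [] then true else l.all pred) = l.all pred by
        intro l pred; split <;> simp_all]
    rw [Bool.eq_iff_iff]
    simp only [List.all_map, List.all_filter, List.all_eq_true, Bool.not_eq_eq_eq_not,
      Bool.not_true, List.any_eq_false, PySem.List.mem_enumerate_iff, Function.comp,
      beq_iff_eq, Bool.or_eq_true,]
    constructor
    · intro h q hq hq4
      rw [List.mem_iff_getElem] at hq
      obtain ⟨j, hj, hqj⟩ := hq
      have hjlt : j < xs.length - 2 := by simpa using lt_of_lt_of_le hj (by simp)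
      have h1j : 1 + j < xs.length := by omega
      simp only [List.getElem_take, List.getElem_drop] at hqj
      have hx := h ((0 + ((1 + j : Nat) : Int)), xs[1 + j]) ⟨1 + j, h1j, rfl⟩
      rcases hx with hne | h0 | hend
      · rw [beq_eq_false_iff_ne] at hne
        exact hne (hqj ▸ hq4)
      · omega
      · simp at hend; omega
    · intro h x hx
      obtain ⟨k, hk, rfl⟩ := hx
      by_cases hk0 : k = 0
      · subst hk0; right; left; simp
      · by_cases hkend : k = xs.length - 1
        · right; right; simp [hkend]; omega
        · left
          rw [beq_eq_false_iff_ne]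
          have hmem : xs[k] ∈ List.take (xs.length - 2) (List.drop 1 xs) := by
            rw [List.mem_iff_getElem]
            refine ⟨k - 1, by simp; omega, ?_⟩
            simp only [List.getElem_take, List.getElem_drop]
            congr 1
            omega
          exact h _ hmem

theorem is_soft_clipping_only_at_ends_spec : Claim_equal_is_soft_clipping_only_at_ends := by
  intro xs _
  exact main_lemma xs
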